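-- pv_equiv track=rewrite | github.com/JoshuaDodds/tricorder | lib/config.py | _find_comment_marker
-- ===== SOURCE A (Python) =====
-- def _find_comment_marker(segment: str) -> int | None:
--     in_single = False
--     in_double = False
--     index = 0
--     while index < len(segment):
--         char = segment[index]
--         if char == "#" and not in_single and not in_double:
--             return index
--         if in_double:
--             if char == "\\":
--                 index += 2
--                 continue
--             if char == '"':
--                 in_double = False
--         elif in_single:
--             if char == "'":
--                 if index + 1 < len(segment) and segment[index + 1] == "'":
--                     index += 2
--                     continue
--                 in_single = False
--         else:
--             if char == '"':
--                 in_double = True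
--             elif char == "'":
--                 in_single = True
--         index += 1
--     return None
-- ===== SOURCE B (Python) =====
-- import re
--
-- # Tokenizer: a double-quoted string (backslash escapes), a single-quoted string
-- # ('' escapes), or any single other character.  Tokens tile the input; the first
-- # single-character '#' token outside any string is the comment marker.
-- _TOKEN = re.compile(r'(?s)"(?:\\.|[^"\\])*"?|\'(?:\'\'|[^\'])*\'?|#|.')
--
-- def _find_comment_marker(segment: str) -> int | None:
--     for m in _TOKEN.finditer(segment):
--         if m.group() == "#":
--             return m.start()
--     return None
-- ===== Notes on version B (the rewrite author's own statement) =====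
-- stated objective: idiomatic
-- what changed: Replaced the hand-rolled boolean-flag state machine over character indices by a compiled regex tokenizer (double-quoted string with backslash escapes | single-quoted string with '' escapes | any single char) scanned with finditer, returning the start of the first bare '#' token.
import Mathlib
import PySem

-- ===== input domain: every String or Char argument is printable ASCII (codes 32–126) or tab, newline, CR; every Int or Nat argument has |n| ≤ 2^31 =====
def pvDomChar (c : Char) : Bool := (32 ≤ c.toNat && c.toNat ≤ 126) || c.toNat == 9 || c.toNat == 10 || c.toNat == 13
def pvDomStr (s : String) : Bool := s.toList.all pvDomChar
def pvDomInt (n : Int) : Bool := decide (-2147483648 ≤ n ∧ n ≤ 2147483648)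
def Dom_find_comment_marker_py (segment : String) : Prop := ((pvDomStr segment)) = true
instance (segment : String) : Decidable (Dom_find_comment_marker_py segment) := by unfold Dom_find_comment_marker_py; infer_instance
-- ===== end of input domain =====

-- B replaces A's index/flag state machine by a regex tokenizer scan; objective: idiomatic.

-- ===== PORT A =====
-- A's while loop over an index with in_single/in_double flags; index jumps by 1 or 2.
def goA (cs : List Char) (inS inD : Bool) (i : Nat) : Option Int :=
  if h : i < cs.length then
    let c := cs[i]
    if c = '#' ∧ inS = false ∧ inD = false then some (i : Int)
    else if inD then
      if c = '\\' then goA cs inS inD (i + 2)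
      else goA cs inS (if c = '"' then false else inD) (i + 1)
    else if inS then
      if c = '\'' then
        if i + 1 < cs.length ∧ cs[i+1]? = some '\'' then goA cs inS inD (i + 2)
        else goA cs false inD (i + 1)
      else goA cs inS inD (i + 1)
    else if c = '"' then goA cs inS true (i + 1)
    else if c = '\'' then goA cs true inD (i + 1)
    else goA cs inS inD (i + 1)
  else none
termination_by cs.length - i

def find_comment_marker_py (segment : String) : Option Int :=
  goA segment.toList false false 0

-- ===== PORT B =====
-- Hand port of the regex alternation (no regex engine in Lean; exact on the whole domain):
-- greedy, deterministic length matched by r'(?:\\.|[^"\\])*"?' after an opening double quote …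
def dstar : List Char → Nat
  | [] => 0
  | '\\' :: [] => 0       -- trailing backslash: \\. and [^"\\] both fail, "? fails
  | '\\' :: _ :: r => 2 + dstar r
  | '"' :: _ => 1
  | _ :: r => 1 + dstar r

-- … and by r"(?:''|[^'])*'?" after an opening single quote.
def sstar : List Char → Nat
  | [] => 0
  | '\'' :: '\'' :: r => 2 + sstar r
  | '\'' :: _ => 1
  | _ :: r => 1 + sstar r

-- length of the token the alternation matches at c :: rest
def tokLen (c : Char) (rest : List Char) : Nat :=
  if c = '"' then 1 + dstar rest
  else if c = '\'' then 1 + sstar rest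
  else 1

-- finditer over the tiling token pattern: consume one token at a time,
-- return the start of the first token that is exactly "#".
def goB : List Char → Nat → Option Int
  | [], _ => none
  | c :: rest, i =>
    if c = '#' then some (i : Int)
    else goB (List.drop (tokLen c rest - 1) rest) (i + tokLen c rest)
termination_by cs _ => cs.length
decreasing_by
  simp only [List.length_drop, List.length_cons]
  omega

def find_comment_marker_py_alt (segment : String) : Option Int :=
  goB segment.toList 0

-- ===== PRECONDITION & SPEC =====
def Spec_find_comment_marker_py (segment : String) (out : Option Int) : Prop := out = find_comment_marker_py_alt segment
instance (segment : String) (out : Option Int) : Decidable (Spec_find_comment_marker_py segment out) := by unfold Spec_find_comment_marker_py; infer_instance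

-- ===== CLAIM (what is proved, stated in full; the proofs are below) =====
def Claim_equal_find_comment_marker_py : Prop := ∀ (segment : String), Dom_find_comment_marker_py segment → Spec_find_comment_marker_py segment (find_comment_marker_py segment)

-- ===== LEMMAS AND PROOFS =====

-- The three states of A's loop correspond to: between tokens (goB), inside an open
-- double-quoted token (dstar of the remaining suffix), inside an open single-quoted
-- token (sstar of the remaining suffix).
-- step lemmas for the token-length functions
theorem dstar_bs1 : dstar ['\\'] = 0 := by simp [dstar]
theorem dstar_bs2 (c : Char) (r : List Char) : dstar ('\\' :: c :: r) = 2 + dstar r := by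
  simp [dstar]
theorem dstar_dq (r : List Char) : dstar ('"' :: r) = 1 := by simp [dstar]
theorem dstar_other (c : Char) (r : List Char) (h1 : ¬ c = '\\') (h2 : ¬ c = '"') :
    dstar (c :: r) = 1 + dstar r := by
  rcases r with _ | ⟨a, b⟩ <;> simp [dstar, h1, h2]
theorem sstar_sq2 (r : List Char) : sstar ('\'' :: '\'' :: r) = 2 + sstar r := by
  simp [sstar]
theorem sstar_close1 : sstar ['\''] = 1 := by simp [sstar]
theorem sstar_close (c2 : Char) (r2 : List Char) (h : ¬ c2 = '\'') :
    sstar ('\'' :: c2 :: r2) = 1 := by simp [sstar, h]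
theorem sstar_other (c : Char) (r : List Char) (h : ¬ c = '\'') :
    sstar (c :: r) = 1 + sstar r := by
  rcases r with _ | ⟨a, b⟩ <;> simp [sstar, h]

theorem goA_goB : ∀ (k : Nat) (cs : List Char) (i : Nat), cs.length - i ≤ k →
    (goA cs false false i = goB (cs.drop i) i) ∧
    (goA cs false true i =
      goB (List.drop (dstar (cs.drop i)) (cs.drop i)) (i + dstar (cs.drop i))) ∧
    (goA cs true false i =
      goB (List.drop (sstar (cs.drop i)) (cs.drop i)) (i + sstar (cs.drop i))) := by
  intro k
  induction k with
  | zero =>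
    intro cs i h
    have hi : ¬ i < cs.length := by omega
    have hd : cs.drop i = [] := List.drop_eq_nil_of_le (by omega)
    refine ⟨?_, ?_, ?_⟩ <;> (rw [goA]; simp [hi, hd, goB, dstar, sstar])
  | succ k ih =>
    intro cs i h
    by_cases hi : i < cs.length
    case neg =>
      have hd : cs.drop i = [] := List.drop_eq_nil_of_le (by omega)
      refine ⟨?_, ?_, ?_⟩ <;> (rw [goA]; simp [hi, hd, goB, dstar, sstar])
    case pos =>
      have hd : cs.drop i = cs[i] :: cs.drop (i + 1) := List.drop_eq_getElem_cons hi
      have hD2 : cs.drop (i + 2) = (cs.drop (i + 1)).drop 1 := by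
        rw [List.drop_drop]
      obtain ⟨P1, Q1, R1⟩ := ih cs (i + 1) (by omega)
      obtain ⟨P2, Q2, R2⟩ := ih cs (i + 2) (by omega)
      refine ⟨?_, ?_, ?_⟩
      · -- state: outside any string
        rw [goA, hd, goB]
        by_cases hq : cs[i] = '#'
        · simp [hi, hq]
        · by_cases hdq : cs[i] = '"'
          · simp [hi, hq, hdq, tokLen, Q1]
            congr 1
            omega
          · by_cases hsq : cs[i] = '\''
            · simp [hi, hq, hdq, hsq, tokLen, R1]
              congr 1
              omega
            · simp [hi, hq, hdq, hsq, tokLen, P1]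
      · -- state: inside a double-quoted token
        rw [goA, hd]
        by_cases hb : cs[i] = '\\'
        · rcases hr : cs.drop (i + 1) with _ | ⟨c2, r2⟩
          · -- trailing backslash at end of string: A's index jumps past the end
            have hlen : ¬ i + 2 < cs.length := by
              have := List.drop_eq_nil_iff.mp hr
              omega
            rw [goA]
            simp [hi, hb, hlen, dstar_bs1, goB, tokLen]
          · have hr2 : cs.drop (i + 2) = r2 := by rw [hD2, hr]; rfl
            rw [hr2] at Q2
            rw [hb, dstar_bs2, show 2 + dstar r2 = dstar r2 + 1 + 1 from by omega]
            simp only [List.drop_succ_cons]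
            simp [hi, hb, Q2]
            congr 1
            omega
        · by_cases hdq : cs[i] = '"'
          · rw [hdq, dstar_dq]
            simp [hi, hb, hdq, P1]
          · rw [dstar_other _ _ hb hdq,
              show 1 + dstar (cs.drop (i + 1)) = dstar (cs.drop (i + 1)) + 1 from by omega]
            simp only [List.drop_succ_cons]
            simp [hi, hb, hdq, Q1]
            congr 1
            omega
      · -- state: inside a single-quoted token
        rw [goA, hd]
        by_cases hsq : cs[i] = '\''
        · rcases hr : cs.drop (i + 1) with _ | ⟨c2, r2⟩
          · -- quote at the very end: closes the string, nothing follows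
            have hlen : ¬ i + 1 < cs.length := by
              have := List.drop_eq_nil_iff.mp hr
              omega
            rw [hr] at P1
            rw [hsq, sstar_close1]
            simp [hi, hsq, hlen, goB, P1]
          · have hr2 : cs.drop (i + 2) = r2 := by rw [hD2, hr]; rfl
            have hlen : i + 1 < cs.length := by
              by_contra hn
              rw [List.drop_eq_nil_of_le (by omega)] at hr
              cases hr
            have hget : cs[i + 1]? = some c2 := by
              have h0 : (cs.drop (i + 1))[0]? = cs[i + 1 + 0]? := List.getElem?_drop ..
              rw [hr] at h0
              simpa using h0.symm
            by_cases hc2 : c2 = '\''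
            · -- doubled single quote: escape, stay inside the string
              subst hc2
              rw [hr2] at R2
              have hg : cs[i + 1]'hlen = '\'' := by
                rw [List.getElem?_eq_getElem hlen] at hget
                exact Option.some.inj hget
              rw [hsq, sstar_sq2, show 2 + sstar r2 = sstar r2 + 1 + 1 from by omega]
              simp only [List.drop_succ_cons]
              simp [hi, hsq, hlen, hget, hg, R2]
              congr 1
              omega
            · -- single quote closes the string
              rw [hr] at P1
              have hcond : ¬ (i + 1 < cs.length ∧ cs[i + 1]? = some '\'') := by
                rintro ⟨-, hc⟩
                rw [hget] at hc
                exact hc2 (Option.some.inj hc)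
              rw [hsq, sstar_close _ _ hc2]
              simp [hi, hsq, hcond, P1]
        · rw [sstar_other _ _ hsq,
            show 1 + sstar (cs.drop (i + 1)) = sstar (cs.drop (i + 1)) + 1 from by omega]
          simp only [List.drop_succ_cons]
          simp [hi, hsq, R1]
          congr 1
          omega

-- ===== VERDICT (by name: the statement is the Claim_ definition above) =====
theorem find_comment_marker_py_spec : Claim_equal_find_comment_marker_py := by
  intro segment _
  unfold Spec_find_comment_marker_py find_comment_marker_py find_comment_marker_py_alt
  have h := (goA_goB segment.toList.length segment.toList 0 (by omega)).1
  simpa using h
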